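-- pv_equiv track=rewrite | github.com/mn838/Data-Structures-and-Algorithms-UCSD | 1 - Algorithmic Toolbox/Week_3/3 - Car Fueling/car_fueling.py | get_num_stops
-- ===== SOURCE A (Python) =====
-- def get_num_stops( distance_between_cities: int, full_tank_mileage: int, num_stops: int, stops: list[int] ) -> int:
--     tank_left = full_tank_mileage
--     stops.insert(0, 0)
--     stops.append( distance_between_cities )
--     num_refills = 0
--
--     if full_tank_mileage >= distance_between_cities:
--         return 0
--
--     i = 1
--     while i < len( stops ):
--         to_next_station = stops[i] - stops[i - 1]
--
--         if to_next_station <= tank_left: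
--             tank_left -= to_next_station
--         else:
--             tank_left = full_tank_mileage
--             if to_next_station > tank_left:
--                 return -1
--             num_refills += 1
--             i -= 1
--
--         i += 1
--
--     return num_refills
-- ===== SOURCE B (Python) =====
-- def get_num_stops(distance_between_cities: int, full_tank_mileage: int, num_stops: int, stops: list[int]) -> int:
--     # Same argument mutations as the original (caller-observable).
--     stops.insert(0, 0)
--     stops.append(distance_between_cities)
--
--     if full_tank_mileage >= distance_between_cities:
--         return 0
--
--     # Maximal-reach greedy: no fuel variable.  `last` is the index of the last
--     # refill (or the start); from it, advance a cursor as far as one full tank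
--     # reaches, refill there, repeat.  Correct because the tank after driving
--     # from the last refill telescopes to full - (stops[i] - stops[last]).
--     n = len(stops)
--     last = 0
--     refills = 0
--     while last < n - 1:
--         current = last
--         while current + 1 < n and stops[current + 1] - stops[last] <= full_tank_mileage:
--             current += 1
--         if current == last:
--             return -1
--         if current == n - 1:
--             return refills
--         refills += 1
--         last = current
--     return refills
-- ===== Notes on version B (the rewrite author's own statement) =====
-- stated objective: alternative
-- what changed: Replaces A's fuel simulation (tank_left decremented gap by gap, with an index backtrack i-=1 on each refill) by the maximal-reach greedy that keeps no fuel variable at all: it tracks only the index of the last refill and advances a cursor while the next stop is within one full tank of that refill point; correctness rests on the proved invariant that A's tank telescopes to full - (stops[i] - stops[last]).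
import Mathlib
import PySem

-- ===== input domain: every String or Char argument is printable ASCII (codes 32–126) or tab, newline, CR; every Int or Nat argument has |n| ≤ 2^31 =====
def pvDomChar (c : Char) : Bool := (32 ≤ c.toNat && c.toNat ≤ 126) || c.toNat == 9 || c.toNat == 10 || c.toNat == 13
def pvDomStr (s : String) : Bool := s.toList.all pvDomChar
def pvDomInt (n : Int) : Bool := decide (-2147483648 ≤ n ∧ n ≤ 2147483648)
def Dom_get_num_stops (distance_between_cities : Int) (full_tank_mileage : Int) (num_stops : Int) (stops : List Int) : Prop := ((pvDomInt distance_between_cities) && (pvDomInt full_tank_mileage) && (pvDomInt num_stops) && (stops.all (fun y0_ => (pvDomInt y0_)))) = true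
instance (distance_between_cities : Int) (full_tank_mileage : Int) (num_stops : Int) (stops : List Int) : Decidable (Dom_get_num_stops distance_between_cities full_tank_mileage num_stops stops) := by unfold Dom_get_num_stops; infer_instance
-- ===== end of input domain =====

-- B replaces A's fuel-tracking backtracking loop by the maximal-reach greedy that keeps only
-- the index of the last refill (objective: alternative).  Both A and B mutate the Python
-- argument `stops` identically (insert 0 at the front, append the distance); the equivalence
-- proved here is about the return value only.

-- ===== PORT A =====
-- A's while loop: state (i, tank_left, num_refills); the else branch sets tank to full,
-- returns -1 if the gap still does not fit, otherwise counts a refill and re-visits index i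
-- (i -= 1 then i += 1).  Indices are kept as Nat since in Python i stays in [1, len(ext));
-- list reads stops[i], stops[i-1] are always in range, so getD is exact here.
def pvAloop (full : Int) (ext : List Int) (i : Nat) (tank : Int) (refills : Int) : Int :=
  if h : i < ext.length then
    let gap := ext.getD i 0 - ext.getD (i - 1) 0
    if gap ≤ tank then
      pvAloop full ext (i + 1) (tank - gap) refills
    else
      -- tank_left = full_tank_mileage
      if gap > full then -1
      else
        -- num_refills += 1; i -= 1; i += 1  →  re-visit the same index with a full tank
        pvAloop full ext i full (refills + 1)
  else refills
termination_by (ext.length - i, (full - tank).toNat)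
decreasing_by
  · exact Prod.Lex.left _ _ (by omega)
  · refine Prod.Lex.right' _ (by omega) ?_
    rename_i hle hgt
    simp only [not_le, not_lt] at hle hgt
    omega

def get_num_stops (distance_between_cities : Int) (full_tank_mileage : Int) (num_stops : Int) (stops : List Int) : Int :=
  -- stops.insert(0, 0); stops.append(distance_between_cities)
  let ext := 0 :: stops ++ [distance_between_cities]
  if full_tank_mileage ≥ distance_between_cities then 0
  else pvAloop full_tank_mileage ext 1 full_tank_mileage 0

-- ===== PORT B =====
-- B's inner while: advance `cur` as long as the next stop is reachable from the last refill.
def pvBinner (full : Int) (ext : List Int) (n : Nat) (last : Nat) (cur : Nat) : Nat :=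
  if cur + 1 < n ∧ ext.getD (cur + 1) 0 - ext.getD last 0 ≤ full then
    pvBinner full ext n last (cur + 1)
  else cur
termination_by n - cur
decreasing_by rename_i h; omega

-- the cursor never moves backwards (needed by pvBouter's termination)
theorem pvBinner_ge (full : Int) (ext : List Int) (n : Nat) (last : Nat) (cur : Nat) :
    cur ≤ pvBinner full ext n last cur := by
  rw [pvBinner]
  split
  · exact le_trans (by omega) (pvBinner_ge full ext n last (cur + 1))
  · exact le_refl cur
termination_by n - cur
decreasing_by rename_i h; omega

-- B's outer while: at its head the cursor always equals `last`, so `last` is the whole state.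
def pvBouter (full : Int) (ext : List Int) (n : Nat) (last : Nat) (refills : Int) : Int :=
  if h : last < n - 1 then
    let c := pvBinner full ext n last last
    if c = last then -1
    else if c = n - 1 then refills
    else pvBouter full ext n c (refills + 1)
  else refills
termination_by n - last
decreasing_by
  have := pvBinner_ge full ext n last last
  rename_i hne _
  omega

def get_num_stops_alt (distance_between_cities : Int) (full_tank_mileage : Int) (num_stops : Int) (stops : List Int) : Int :=
  let ext := 0 :: stops ++ [distance_between_cities]
  if full_tank_mileage ≥ distance_between_cities then 0
  else pvBouter full_tank_mileage ext ext.length 0 0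

-- ===== PRECONDITION & SPEC =====
def Spec_get_num_stops (distance_between_cities : Int) (full_tank_mileage : Int) (num_stops : Int) (stops : List Int) (out : Int) : Prop := out = get_num_stops_alt distance_between_cities full_tank_mileage num_stops stops
instance (distance_between_cities : Int) (full_tank_mileage : Int) (num_stops : Int) (stops : List Int) (out : Int) : Decidable (Spec_get_num_stops distance_between_cities full_tank_mileage num_stops stops out) := by unfold Spec_get_num_stops; infer_instance

-- ===== CLAIM (what is proved, stated in full; the proofs are below) =====
def Claim_equal_get_num_stops : Prop := ∀ (distance_between_cities : Int) (full_tank_mileage : Int) (num_stops : Int) (stops : List Int), Dom_get_num_stops distance_between_cities full_tank_mileage num_stops stops → Spec_get_num_stops distance_between_cities full_tank_mileage num_stops stops (get_num_stops distance_between_cities full_tank_mileage num_stops stops)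

-- ===== LEMMAS AND PROOFS =====

-- If the inner while cannot move, the cursor is returned unchanged.
theorem pvBinner_stop (full : Int) (ext : List Int) (n : Nat) (last : Nat) (cur : Nat)
    (h : ¬ (cur + 1 < n ∧ ext.getD (cur + 1) 0 - ext.getD last 0 ≤ full)) :
    pvBinner full ext n last cur = cur := by
  rw [pvBinner, if_neg h]

-- KEY INVARIANT: A's tank at index i telescopes to full - (ext[i-1] - ext[last]); from there
-- A's loop behaves like B's inner scan from the last refill.
theorem pvKey (full : Int) (ext : List Int) (last i : Nat) (refills : Int)
    (h1 : last + 1 ≤ i) (h2 : i ≤ ext.length) (h3 : last + 1 < ext.length) :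
    pvAloop full ext i (full - (ext.getD (i - 1) 0 - ext.getD last 0)) refills
      = (let c := pvBinner full ext ext.length last (i - 1)
         if c = last then -1
         else if c = ext.length - 1 then refills
         else pvAloop full ext (c + 1) full (refills + 1)) := by
  by_cases h : i < ext.length
  · rw [pvAloop]
    simp only [h, dif_pos]
    by_cases hcan : ext.getD i 0 - ext.getD last 0 ≤ full
    · -- gap fits the tank ⟺ reachable from last refill; both sides advance
      have hle : ext.getD i 0 - ext.getD (i - 1) 0
          ≤ full - (ext.getD (i - 1) 0 - ext.getD last 0) := by omega
      rw [if_pos hle]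
      have harith : full - (ext.getD (i - 1) 0 - ext.getD last 0)
          - (ext.getD i 0 - ext.getD (i - 1) 0)
          = full - (ext.getD (i + 1 - 1) 0 - ext.getD last 0) := by
        simp only [Nat.add_sub_cancel]; ring
      rw [harith, pvKey full ext last (i + 1) refills (by omega) (by omega) h3]
      have hbin : pvBinner full ext ext.length last (i - 1)
          = pvBinner full ext ext.length last i := by
        conv_lhs => rw [pvBinner]
        have hi1 : i - 1 + 1 = i := by omega
        rw [hi1, if_pos ⟨h, hcan⟩]
      simp only [Nat.add_sub_cancel, hbin]
    · -- next stop out of reach from the last refill: inner scan stops at i-1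
      have hbin : pvBinner full ext ext.length last (i - 1) = i - 1 := by
        apply pvBinner_stop
        have : i - 1 + 1 = i := by omega
        rw [this]
        tauto
      simp only [hbin]
      by_cases heq : i - 1 = last
      · -- the single gap itself exceeds a full tank: -1 on both sides
        have hgap : ¬ ext.getD i 0 - ext.getD (i - 1) 0
            ≤ full - (ext.getD (i - 1) 0 - ext.getD last 0) := by omega
        have hbig : ext.getD i 0 - ext.getD (i - 1) 0 > full := by rw [heq]; omega
        rw [if_neg hgap, if_pos hbig, if_pos heq]
      · have hne : i - 1 ≠ ext.length - 1 := by omega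
        rw [if_neg heq, if_neg hne]
        have hi1 : i - 1 + 1 = i := by omega
        rw [hi1]
        have hgap : ¬ ext.getD i 0 - ext.getD (i - 1) 0
            ≤ full - (ext.getD (i - 1) 0 - ext.getD last 0) := by omega
        rw [if_neg hgap]
        by_cases hbig : ext.getD i 0 - ext.getD (i - 1) 0 > full
        · -- A returns -1 directly; the refilled revisit also returns -1
          rw [if_pos hbig, pvAloop]
          simp only [h, dif_pos]
          rw [if_neg (by omega), if_pos hbig]
        · rw [if_neg hbig]
  · -- i = ext.length: A's loop ends; the inner scan is already at the final index
    have hieq : i = ext.length := by omega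
    rw [pvAloop]
    simp only [h, dif_neg, not_false_iff]
    have hbin : pvBinner full ext ext.length last (i - 1) = i - 1 := by
      apply pvBinner_stop
      omega
    simp only [hbin]
    rw [if_neg (by omega), if_pos (by omega)]
termination_by ext.length - i
decreasing_by omega

-- Outer correspondence: starting freshly refilled at index `last`, A's loop from index
-- last+1 with a full tank computes B's outer loop.
theorem pvMain (full : Int) (ext : List Int) (d : Nat) :
    ∀ (last : Nat) (refills : Int), ext.length - last ≤ d →
      pvAloop full ext (last + 1) full refills = pvBouter full ext ext.length last refills := by
  induction d with
  | zero =>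
    intro last refills hd
    rw [pvAloop, dif_neg (show ¬ last + 1 < ext.length by omega),
        pvBouter, dif_neg (show ¬ last < ext.length - 1 by omega)]
  | succ d ih =>
    intro last refills hd
    by_cases hlt : last + 1 < ext.length
    · have := pvKey full ext last (last + 1) refills (le_refl _) (by omega) hlt
      simp only [Nat.add_sub_cancel, sub_self, sub_zero] at this
      rw [this, pvBouter, dif_pos (by omega)]
      have hge := pvBinner_ge full ext ext.length last last
      set c := pvBinner full ext ext.length last last with hc
      by_cases h1 : c = last
      · simp [h1]
      · rw [if_neg h1, if_neg h1]
        by_cases h2 : c = ext.length - 1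
        · simp [h2]
        · rw [if_neg h2, if_neg h2]
          exact ih c (refills + 1) (by omega)
    · rw [pvAloop, dif_neg hlt, pvBouter, dif_neg (show ¬ last < ext.length - 1 by omega)]

-- ===== VERDICT (by name: the statement is the Claim_ definition above) =====
theorem get_num_stops_spec : Claim_equal_get_num_stops := by
  intro d full n stops _
  unfold Spec_get_num_stops get_num_stops get_num_stops_alt
  by_cases h : full ≥ d
  · simp [h]
  · simp only [h, if_neg, not_false_iff]
    exact pvMain full (0 :: stops ++ [d]) (0 :: stops ++ [d]).length 0 0 (by omega)
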